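-- pv_equiv track=rewrite | github.com/SzymonK1306/RS232-simulator | client.py | prepare_data_to_send
-- ===== SOURCE A (Python) =====
-- def prepare_data_to_send(data):
--     # each letter written in ascii
--     message_pack = [bin(ord(letter)) for letter in data]
--
--     rs232_pack = ''
--
--     for byte in message_pack:
--         single_packet = byte[2::]
--
--         # it should be a full byte
--         if len(single_packet) < 8:
--             single_packet = '0' * (8 - len(single_packet)) + single_packet
--
--         # LSB to MSB
--         single_packet = single_packet[::-1]
--
--         # add start stop bits
--         single_packet = '0' + single_packet + '11'
--
--         # add to packet
--         rs232_pack = rs232_pack + single_packet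
--
--     return rs232_pack
-- ===== SOURCE B (Python) =====
-- def prepare_data_to_send(data):
--     frames = []
--     for ch in data:
--         code = ord(ch)
--         nbits = max(8, code.bit_length())
--         bits = ''.join(str((code >> i) & 1) for i in range(nbits))
--         frames.append('0' + bits + '11')
--     return ''.join(frames)
-- ===== Notes on version B (the rewrite author's own statement) =====
-- stated objective: alternative
-- what changed: B builds each frame's LSB-first payload directly with bit shifts over range(max(8, bit_length)) and joins the frames once, instead of A's bin()-string slicing, left-padding, string reversal and repeated string concatenation.
import Mathlib
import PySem

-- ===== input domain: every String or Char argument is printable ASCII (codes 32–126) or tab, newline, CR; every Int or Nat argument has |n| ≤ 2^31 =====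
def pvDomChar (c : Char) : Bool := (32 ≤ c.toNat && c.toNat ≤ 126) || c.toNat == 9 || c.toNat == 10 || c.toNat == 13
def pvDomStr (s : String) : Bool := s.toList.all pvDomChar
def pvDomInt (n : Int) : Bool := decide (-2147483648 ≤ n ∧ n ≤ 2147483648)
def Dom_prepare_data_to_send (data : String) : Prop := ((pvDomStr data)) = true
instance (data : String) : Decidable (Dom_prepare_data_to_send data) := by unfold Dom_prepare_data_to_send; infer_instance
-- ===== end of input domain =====

-- B replaces A's bin()-string slice/pad/reverse and repeated concatenation by a direct
-- LSB-first bit loop (shift and mask) per character and a single join (objective: alternative).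

-- ===== PORT A =====
-- binary digit characters of n, MSB-first (empty for 0); helper for Python's bin()
def pvBinDigits : Nat → List Char
  | 0 => []
  | n+1 => pvBinDigits ((n+1)/2) ++ [if (n+1) % 2 = 1 then '1' else '0']
decreasing_by exact Nat.div_lt_self (Nat.succ_pos n) one_lt_two

-- bin(n) for n ≥ 0 (hand-ported, exact on Nat: "0b" prefix, bin(0) = "0b0")
def pvBin (n : Nat) : List Char := '0' :: 'b' :: (if n = 0 then ['0'] else pvBinDigits n)

def prepare_data_to_send (data : String) : String :=
  let message_pack := data.toList.map (fun letter => pvBin letter.toNat)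
  let rs232_pack := message_pack.foldl (fun rs232_pack byte =>
    -- byte[2::]  (hand-ported: start 2 ≥ 0, step 1 — drop 2 is exact here)
    let single_packet := byte.drop 2
    let single_packet := if single_packet.length < 8 then
        List.replicate (8 - single_packet.length) '0' ++ single_packet else single_packet
    -- [::-1]
    let single_packet := single_packet.reverse
    let single_packet := '0' :: (single_packet ++ ['1', '1'])
    rs232_pack ++ single_packet) []
  String.mk rs232_pack

-- ===== PORT B =====
-- one RS232 frame for a character code (Nat.size = Python's int.bit_length on Nat)
def pvFrame (code : Nat) : List Char :=
  let nbits := max 8 (Nat.size code)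
  let bits := (List.range nbits).map (fun i => if (code >>> i) % 2 = 1 then '1' else '0')
  '0' :: (bits ++ ['1', '1'])

def prepare_data_to_send_alt (data : String) : String :=
  String.mk (data.toList.flatMap (fun ch => pvFrame ch.toNat))

-- ===== PRECONDITION & SPEC =====
def Spec_prepare_data_to_send (data : String) (out : String) : Prop := out = prepare_data_to_send_alt data
instance (data : String) (out : String) : Decidable (Spec_prepare_data_to_send data out) := by unfold Spec_prepare_data_to_send; infer_instance

-- ===== CLAIM (what is proved, stated in full; the proofs are below) =====
def Claim_equal_prepare_data_to_send : Prop := ∀ (data : String), Dom_prepare_data_to_send data → Spec_prepare_data_to_send data (prepare_data_to_send data)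

-- ===== LEMMAS AND PROOFS =====

-- the LSB-first bit characters of n, k of them
def pvLSB (k n : Nat) : List Char :=
  (List.range k).map (fun i => if (n >>> i) % 2 = 1 then '1' else '0')

theorem pvShift_succ (n i : Nat) : n >>> (i+1) = (n/2) >>> i := by
  induction i with
  | zero => simp [Nat.shiftRight_succ, Nat.shiftRight_zero]
  | succ j ih => rw [Nat.shiftRight_succ, ih, Nat.shiftRight_succ]

theorem pvLSB_succ (k n : Nat) :
    pvLSB (k+1) n = (if n % 2 = 1 then '1' else '0') :: pvLSB k (n/2) := by
  unfold pvLSB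
  rw [List.range_succ_eq_map, List.map_cons, List.map_map]
  simp [Nat.shiftRight_zero, pvShift_succ, Function.comp]

theorem pvSize_succ (n : Nat) (h : 0 < n) : Nat.size n = Nat.size (n/2) + 1 := by
  apply Nat.le_antisymm
  · rw [Nat.size_le, pow_succ]
    have h1 := Nat.lt_size_self (n/2)
    omega
  · rw [Nat.succ_le_iff, Nat.lt_size]
    rcases Nat.eq_zero_or_pos (n/2) with h0 | h0
    · simp [h0]; omega
    · have h1 : Nat.size (n/2) - 1 < Nat.size (n/2) := by
        have := Nat.size_pos.mpr h0; omega
      rw [Nat.lt_size] at h1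
      have h2 : 2 ^ Nat.size (n/2) = 2 * 2 ^ (Nat.size (n/2) - 1) := by
        have := Nat.size_pos.mpr h0
        rw [← pow_succ']; congr 1; omega
      omega

theorem pvBinDigits_eq (n : Nat) : pvBinDigits n = (pvLSB (Nat.size n) n).reverse := by
  induction n using Nat.strong_induction_on with
  | _ n ih =>
    match n with
    | 0 => simp [pvBinDigits, pvLSB, Nat.size_zero]
    | m+1 =>
      rw [pvBinDigits, ih ((m+1)/2) (Nat.div_lt_self (Nat.succ_pos m) one_lt_two),
        pvSize_succ (m+1) (Nat.succ_pos m), pvLSB_succ, List.reverse_cons]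

theorem pvLSB_length (k n : Nat) : (pvLSB k n).length = k := by
  simp [pvLSB]

theorem pvLSB_pad (k n : Nat) (h : Nat.size n ≤ k) :
    pvLSB k n = pvLSB (Nat.size n) n ++ List.replicate (k - Nat.size n) '0' := by
  obtain ⟨m, rfl⟩ : ∃ m, k = Nat.size n + m := ⟨k - Nat.size n, by omega⟩
  unfold pvLSB
  rw [List.range_add, List.map_append, List.map_map, Nat.add_sub_cancel_left]
  congr 1
  · have : ∀ j, (n >>> (Nat.size n + j)) % 2 = 0 := by
      intro j
      have hz : n >>> (Nat.size n + j) = 0 := by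
        rw [Nat.shiftRight_eq_div_pow]
        apply Nat.div_eq_of_lt
        calc n < 2 ^ Nat.size n := Nat.lt_size_self n
          _ ≤ 2 ^ (Nat.size n + j) := Nat.pow_le_pow_right (by norm_num) (by omega)
      simp [hz]
    rw [List.eq_replicate_iff]
    constructor
    · simp
    · intro c hc
      simp only [List.mem_map, List.mem_range] at hc
      obtain ⟨j, _, hj⟩ := hc
      subst hj
      simp [Function.comp, this j]

-- A's frame transformation, applied to bin(n), equals B's frame, for every n
theorem pvFrame_eq (n : Nat) :
    (let single_packet := (pvBin n).drop 2
     let single_packet := if single_packet.length < 8 then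
        List.replicate (8 - single_packet.length) '0' ++ single_packet else single_packet
     let single_packet := single_packet.reverse
     '0' :: (single_packet ++ ['1', '1'])) = pvFrame n := by
  rcases Nat.eq_zero_or_pos n with h0 | h0
  · subst h0; decide
  · have hne : n ≠ 0 := by omega
    simp only [pvBin, hne, if_false, List.drop_succ_cons, List.drop_zero, pvFrame]
    have hlen : (pvBinDigits n).length = Nat.size n := by
      rw [pvBinDigits_eq, List.length_reverse, pvLSB_length]
    rw [hlen]
    by_cases h8 : Nat.size n < 8
    · have hmax : max 8 (Nat.size n) = 8 := by omega
      simp only [if_pos h8, hmax, List.reverse_append, List.reverse_replicate,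
        pvBinDigits_eq, List.reverse_reverse]
      have hb : (List.range 8).map (fun i => if (n >>> i) % 2 = 1 then '1' else '0')
          = pvLSB 8 n := rfl
      rw [hb, pvLSB_pad 8 n (by omega), List.append_assoc]
    · have hmax : max 8 (Nat.size n) = Nat.size n := by omega
      simp only [if_neg h8, hmax, pvBinDigits_eq, List.reverse_reverse]
      have hb : (List.range (Nat.size n)).map (fun i => if (n >>> i) % 2 = 1 then '1' else '0')
          = pvLSB (Nat.size n) n := rfl
      rw [hb]

-- ===== VERDICT (by name: the statement is the Claim_ definition above) =====
theorem prepare_data_to_send_spec : Claim_equal_prepare_data_to_send := by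
  intro data _
  unfold Spec_prepare_data_to_send prepare_data_to_send prepare_data_to_send_alt
  simp only []
  rw [PySem.List.foldl_append_eq_flatMap
    (g := fun byte : List Char =>
      let single_packet := byte.drop 2
      let single_packet := if single_packet.length < 8 then
        List.replicate (8 - single_packet.length) '0' ++ single_packet else single_packet
      let single_packet := single_packet.reverse
      '0' :: (single_packet ++ ['1', '1'])),
    List.nil_append, List.flatMap_map]
  have hfun : (fun a : Char =>
      let single_packet := List.drop 2 (pvBin a.toNat)
      let single_packet := if single_packet.length < 8 then
        List.replicate (8 - single_packet.length) '0' ++ single_packet else single_packet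
      let single_packet := single_packet.reverse
      '0' :: (single_packet ++ ['1', '1'])) = (fun ch : Char => pvFrame ch.toNat) :=
    funext fun ch => pvFrame_eq ch.toNat
  rw [hfun]
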